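-- pv_equiv track=rewrite | github.com/lfdyf20/Leetcode | Combination Sum III.py | cb3
-- ===== SOURCE A (Python) =====
-- def cb3(k, n ):
-- 	def travel( nums, k, n, path, res ):
-- 		if n < 0:
-- 			return
-- 		if k == 0:
-- 			if n != 0:
-- 				return
-- 			if n == 0:
-- 				if path not in res:
-- 					res.append( path )
-- 				return
-- 		if len(nums) < k:
-- 			return
-- 		if len(nums) == k:
-- 			if sum(nums) == n:
-- 				res.append( path+nums )
-- 			return
-- 		travel( nums[1:], k, n, path, res )
-- 		travel( nums[1:], k-1, n-nums[0], path + [nums[0]], res )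
--
-- 	res = []
-- 	nums = [i for i in range(1,10)]
-- 	travel( nums, k, n, [], res )
-- 	return res
-- ===== SOURCE B (Python) =====
-- def cb3(k, n):
--     res = []
--     for mask in range(512):
--         combo = [d for d in range(1, 10) if (mask >> (9 - d)) & 1]
--         if len(combo) == k and sum(combo) == n:
--             res.append(combo)
--     return res
-- ===== Notes on version B (the rewrite author's own statement) =====
-- stated objective: idiomatic
-- what changed: Replaced the recursive include/exclude backtracking with inner helper function and mutable result list by a flat bitmask loop over the 512 subsets of {1..9}, decoding digit d from bit (9-d) so ascending masks reproduce A's emission order exactly.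
import Mathlib
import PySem

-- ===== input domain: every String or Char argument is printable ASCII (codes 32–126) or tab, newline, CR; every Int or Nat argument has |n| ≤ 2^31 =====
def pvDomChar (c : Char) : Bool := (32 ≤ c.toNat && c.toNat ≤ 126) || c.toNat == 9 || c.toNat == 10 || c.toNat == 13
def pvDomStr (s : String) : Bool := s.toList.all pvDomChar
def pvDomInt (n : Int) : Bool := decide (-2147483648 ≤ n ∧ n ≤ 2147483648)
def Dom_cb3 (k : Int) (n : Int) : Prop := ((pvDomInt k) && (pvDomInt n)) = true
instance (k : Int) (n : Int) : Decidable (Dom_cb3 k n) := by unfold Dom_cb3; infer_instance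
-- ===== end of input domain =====

-- B replaces A's recursive include/exclude backtracking (helper + mutable result list) by a
-- flat bitmask loop over the 512 subsets of {1..9}; same exact output order.

-- ===== PORT A =====
-- A's inner `travel` recurses on nums[1:]; guards transcribed in order.  In Python,
-- nums = [] with k < 0 falls through every guard and recurses forever on nums[1:] = []
-- (RecursionError); the Lean recursion must be total, so that branch — unreachable under
-- Pre_cb3 — returns res unchanged.
def cb3Travel (nums : List Int) (k : Int) (n : Int) (path : List Int)
    (res : List (List Int)) : List (List Int) :=
  if n < 0 then res
  else if k = 0 then
    -- Python: `if k == 0:` — both sub-branches return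
    if n ≠ 0 then res
    else if path ∈ res then res else res ++ [path]
  else if (nums.length : Int) < k then res
  else if (nums.length : Int) = k then
    if nums.sum = n then res ++ [path ++ nums] else res
  else
    match nums with
    | [] => res  -- unreachable when 0 ≤ k (Python diverges here for k < 0)
    | x :: rest =>
      let res' := cb3Travel rest k n path res
      cb3Travel rest (k - 1) (n - x) (path ++ [x]) res'

def cb3 (k : Int) (n : Int) : List (List Int) :=
  cb3Travel (PySem.List.pyRange 1 10 1) k n [] []

-- ===== PORT B =====
-- combo = [d for d in range(1, 10) if (mask >> (9 - d)) & 1]  (0 ≤ mask < 512, 0 ≤ 9-d)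
def cb3Combo (mask : Int) : List Int :=
  (PySem.List.pyRange 1 10 1).filter (fun d => (mask.toNat >>> (9 - d).toNat) &&& 1 ≠ 0)

def cb3_alt (k : Int) (n : Int) : List (List Int) :=
  (PySem.List.pyRange 0 512 1).foldl
    (fun res mask =>
      let combo := cb3Combo mask
      if (combo.length : Int) = k ∧ combo.sum = n then res ++ [combo] else res)
    []

-- ===== PRECONDITION & SPEC =====
-- Pre_cb3 excludes exactly the inputs (k < 0 with 0 ≤ n) on which A's recursion never
-- terminates and Python raises RecursionError.
def Pre_cb3 (k : Int) (n : Int) : Prop := 0 ≤ k ∨ n < 0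
instance (k : Int) (n : Int) : Decidable (Pre_cb3 k n) := by unfold Pre_cb3; infer_instance
def pvWitness_cb3 : Int × Int := (3, 9)

def Spec_cb3 (k : Int) (n : Int) (out : List (List Int)) : Prop := out = cb3_alt k n
instance (k : Int) (n : Int) (out : List (List Int)) : Decidable (Spec_cb3 k n out) := by unfold Spec_cb3; infer_instance

-- ===== CLAIM (what is proved, stated in full; the proofs are below) =====
def Claim_equal_cb3 : Prop := ∀ (k : Int) (n : Int), Dom_cb3 k n → Pre_cb3 k n → Spec_cb3 k n (cb3 k n)

-- ===== LEMMAS AND PROOFS =====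

-- subset enumeration of l in A's exclude-then-include order
def cb3Pick : List Int → List (List Int)
  | [] => [[]]
  | x :: rest => cb3Pick rest ++ (cb3Pick rest).map (fun c => x :: c)

lemma cb3Pick_mem_mem {l : List Int} {c : List Int} (hc : c ∈ cb3Pick l)
    {y : Int} (hy : y ∈ c) : y ∈ l := by
  induction l generalizing c with
  | nil => simp [cb3Pick] at hc; subst hc; simp at hy
  | cons x rest ih =>
    simp only [cb3Pick, List.mem_append, List.mem_map] at hc
    rcases hc with hc | ⟨c', hc', rfl⟩
    · exact List.mem_cons_of_mem x (ih hc hy)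
    · rcases List.mem_cons.mp hy with rfl | hy'
      · exact List.mem_cons_self
      · exact List.mem_cons_of_mem x (ih hc' hy')

lemma cb3Pick_length_le {l : List Int} {c : List Int} (hc : c ∈ cb3Pick l) :
    c.length ≤ l.length := by
  induction l generalizing c with
  | nil => simp [cb3Pick] at hc; subst hc; simp
  | cons x rest ih =>
    simp only [cb3Pick, List.mem_append, List.mem_map] at hc
    rcases hc with hc | ⟨c', hc', rfl⟩
    · exact le_trans (ih hc) (by simp)
    · simpa using ih hc'

lemma cb3Pick_filter_len0 (l : List Int) :
    (cb3Pick l).filter (fun c => decide (((c.length : Int)) = 0 ∧ c.sum = 0)) = [[]] := by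
  induction l with
  | nil => simp [cb3Pick]
  | cons x rest ih =>
    simp only [cb3Pick, List.filter_append, ih]
    rw [List.filter_eq_nil_iff.mpr (by
      intro a ha
      rcases List.mem_map.mp ha with ⟨c, hc, rfl⟩
      simp
      intro h
      omega)]
    simp

lemma cb3Pick_filter_full (l : List Int) (n : Int) :
    (cb3Pick l).filter (fun c => decide (((c.length : Int)) = (l.length : Int) ∧ c.sum = n))
      = if l.sum = n then [l] else [] := by
  induction l generalizing n with
  | nil =>
    simp [cb3Pick, List.filter]
    rcases eq_or_ne n 0 with rfl | hne
    · simp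
    · simp [Ne.symm hne]
  | cons x rest ih =>
    simp only [cb3Pick, List.filter_append, List.filter_map]
    have h1 : (cb3Pick rest).filter
        (fun c => decide (((c.length : Int)) = ((x :: rest).length : Int) ∧ c.sum = n)) = [] := by
      apply List.filter_eq_nil_iff.mpr
      intro c hc
      have := cb3Pick_length_le hc
      simp; intro hlen; omega
    have h2 : ((cb3Pick rest).filter
        ((fun c => decide (((c.length : Int)) = ((x :: rest).length : Int) ∧ c.sum = n)) ∘
          (fun c => x :: c)))
        = (cb3Pick rest).filter
          (fun c => decide (((c.length : Int)) = (rest.length : Int) ∧ c.sum = n - x)) := by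
      apply List.filter_congr
      intro c _
      simp only [Function.comp_apply, List.length_cons, List.sum_cons, decide_eq_decide]
      constructor
      · rintro ⟨h, h'⟩; constructor; · push_cast at h ⊢; omega
        · omega
      · rintro ⟨h, h'⟩; constructor; · push_cast at h ⊢; omega
        · omega
    rw [h1, h2, ih (n - x)]
    by_cases hs : rest.sum = n - x
    · rw [if_pos hs, if_pos (by simp [List.sum_cons]; omega)]
      simp
    · rw [if_neg hs, if_neg (by simp [List.sum_cons]; omega)]
      simp

-- A's travel appends exactly the qualifying subsets of nums, in pick order, after path
lemma cb3Travel_spec (nums : List Int) (k n : Int) (path : List Int) (res : List (List Int))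
    (hpos : ∀ x ∈ nums, 0 < x) (hnd : nums.Nodup) (hk : 0 ≤ k)
    (hres : ∀ r ∈ res, ¬ path <+: r) :
    cb3Travel nums k n path res
      = res ++ ((cb3Pick nums).filter
          (fun c => decide (((c.length : Int)) = k ∧ c.sum = n))).map (fun c => path ++ c) := by
  induction nums generalizing k n path res with
  | nil =>
    unfold cb3Travel
    by_cases hn : n < 0
    · rw [if_pos hn]
      have h2 : ¬ (0 : Int) = n := by omega
      simp [cb3Pick, h2]
    · rw [if_neg hn]
      by_cases hk0 : k = 0
      · subst hk0
        rw [if_pos rfl]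
        by_cases hn0 : n = 0
        · subst hn0
          rw [if_neg (by simp), if_neg (by
            intro hmem
            exact hres path hmem (List.prefix_refl path))]
          simp [cb3Pick]
        · rw [if_pos hn0]
          have h2 : ¬ (0 : Int) = n := fun h => hn0 h.symm
          simp [cb3Pick, h2]
      · rw [if_neg hk0, if_pos (by simp only [List.length_nil, Nat.cast_zero]; omega)]
        have h2 : ¬ (0 : Int) = k := fun h => hk0 h.symm
        simp [cb3Pick, h2]
  | cons x rest ih =>
    have hxpos : 0 < x := hpos x (by simp)
    have hrpos : ∀ y ∈ rest, 0 < y := fun y hy => hpos y (by simp [hy])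
    have hxnotin : x ∉ rest := (List.nodup_cons.mp hnd).1
    have hrnd : rest.Nodup := (List.nodup_cons.mp hnd).2
    unfold cb3Travel
    by_cases hn : n < 0
    · rw [if_pos hn]
      rw [List.filter_eq_nil_iff.mpr (by
        intro c hc
        have hsum : 0 ≤ c.sum := List.sum_nonneg (fun y hy =>
          le_of_lt (hpos y (cb3Pick_mem_mem hc hy)))
        simp; intro _; omega)]
      simp
    · rw [if_neg hn]
      by_cases hk0 : k = 0
      · subst hk0
        rw [if_pos rfl]
        have hn0 : n ≠ 0 → ((cb3Pick (x :: rest)).filter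
            (fun c => decide (((c.length : Int)) = 0 ∧ c.sum = n))) = [] := by
          intro hne
          apply List.filter_eq_nil_iff.mpr
          intro c hc
          simp
          intro hlen
          have : c = [] := by exact_mod_cast hlen
          subst this
          simpa using fun h => hne h.symm
        by_cases hne : n = 0
        · subst hne
          rw [if_neg (by simp), if_neg (by
            intro hmem
            exact hres path hmem (List.prefix_refl path))]
          rw [cb3Pick_filter_len0]
          simp
        · rw [if_pos hne, hn0 hne]
          simp
      · rw [if_neg hk0]
        by_cases hlt : ((x :: rest).length : Int) < k
        · rw [if_pos hlt]
          rw [List.filter_eq_nil_iff.mpr (by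
            intro c hc
            have := cb3Pick_length_le hc
            simp; intro hlen; omega)]
          simp
        · rw [if_neg hlt]
          by_cases heq : ((x :: rest).length : Int) = k
          · rw [if_pos heq]
            rw [← heq, cb3Pick_filter_full]
            by_cases hs : (x :: rest).sum = n
            · rw [if_pos hs, if_pos hs]; simp
            · rw [if_neg hs, if_neg hs]; simp
          · rw [if_neg heq]
            have hk1 : 1 ≤ k := by omega
            have step1 := ih k n path res hrpos hrnd hk hres
            have hres' : ∀ r ∈ res ++ ((cb3Pick rest).filter
                (fun c => decide (((c.length : Int)) = k ∧ c.sum = n))).map (fun c => path ++ c),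
                ¬ (path ++ [x]) <+: r := by
              intro r hr
              rcases List.mem_append.mp hr with hr | hr
              · intro hpre
                exact hres r hr (((path.prefix_append [x])).trans hpre)
              · rcases List.mem_map.mp hr with ⟨c, hc, rfl⟩
                have hc' := List.mem_filter.mp hc
                intro hpre
                have hxc : [x] <+: c := (List.prefix_append_right_inj path).mp hpre
                rcases hxc with ⟨t, ht⟩
                have : x ∈ c := by rw [← ht]; simp
                exact hxnotin (cb3Pick_mem_mem hc'.1 this)
            have step2 := ih (k - 1) (n - x) (path ++ [x]) _ hrpos hrnd (by omega) hres'
            simp only []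
            rw [step1, step2]
            simp only [cb3Pick, List.filter_append, List.map_append, List.filter_map, List.map_map]
            rw [List.append_assoc]
            congr 2
            have hpred : ((cb3Pick rest).filter
                ((fun c => decide (((c.length : Int)) = k ∧ c.sum = n)) ∘ (fun c => x :: c)))
                = (cb3Pick rest).filter
                  (fun c => decide (((c.length : Int)) = k - 1 ∧ c.sum = n - x)) := by
              apply List.filter_congr
              intro c _
              simp only [Function.comp_apply, List.length_cons, List.sum_cons, decide_eq_decide]
              constructor
              · rintro ⟨h, h'⟩
                refine ⟨by push_cast at h ⊢; omega, by omega⟩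
              · rintro ⟨h, h'⟩
                refine ⟨by push_cast at h ⊢; omega, by omega⟩
            rw [hpred]
            apply List.map_congr_left
            intro c _
            simp

lemma cb3_eq_filter (k n : Int) (hk : 0 ≤ k) :
    cb3 k n = (cb3Pick (PySem.List.pyRange 1 10 1)).filter
      (fun c => decide (((c.length : Int)) = k ∧ c.sum = n)) := by
  unfold cb3
  rw [cb3Travel_spec _ k n [] []
    (by intro x hx; rw [PySem.List.mem_pyRange_one] at hx; omega)
    (by decide) hk (by simp)]
  simp

lemma cb3_alt_eq_filter (k n : Int) :
    cb3_alt k n = ((PySem.List.pyRange 0 512 1).map cb3Combo).filter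
      (fun c => decide (((c.length : Int)) = k ∧ c.sum = n)) := by
  unfold cb3_alt
  rw [show (fun (res : List (List Int)) (mask : Int) =>
        let combo := cb3Combo mask
        if (combo.length : Int) = k ∧ combo.sum = n then res ++ [combo] else res)
      = fun res mask => if ((cb3Combo mask).length : Int) = k ∧ (cb3Combo mask).sum = n
          then res ++ [cb3Combo mask] else res from rfl]
  rw [PySem.List.foldl_append_ite, List.filter_map]
  simp only [List.nil_append, Function.comp_def]

-- ascending masks decode, via bit (9-d) ↔ digit d, to exactly A's subset order
set_option maxRecDepth 100000 in
lemma cb3_map_eq_pick :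
    (PySem.List.pyRange 0 512 1).map cb3Combo = cb3Pick (PySem.List.pyRange 1 10 1) := by
  decide

lemma cb3_alt_neg_n (k n : Int) (hn : n < 0) : cb3_alt k n = [] := by
  rw [cb3_alt_eq_filter, cb3_map_eq_pick]
  apply List.filter_eq_nil_iff.mpr
  intro c hc
  have hsum : 0 ≤ c.sum := List.sum_nonneg (fun y hy => by
    have := cb3Pick_mem_mem hc hy
    rw [PySem.List.mem_pyRange_one] at this
    omega)
  simp
  intro _
  omega

lemma cb3_neg_n (k n : Int) (hn : n < 0) : cb3 k n = [] := by
  unfold cb3 cb3Travel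
  simp [hn]

-- ===== VERDICT (by name: the statement is the Claim_ definition above) =====
theorem cb3_spec : Claim_equal_cb3 := by
  intro k n _ hpre
  unfold Spec_cb3
  rcases hpre with hk | hn
  · rw [cb3_eq_filter k n hk, cb3_alt_eq_filter, cb3_map_eq_pick]
  · rw [cb3_neg_n k n hn, cb3_alt_neg_n k n hn]
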